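-- pv_equiv track=rewrite | github.com/adiram359/gruvbox-material-syntax | syntax-test.py | findPartner
-- ===== SOURCE A (Python) =====
-- def findPartner(people, target):
--     l = 0
--     r = len(people) - 1
--     i = -1
--     while l <= r:
--         mid = (l + r)//2
--         if people[mid] == target:
--             return mid
--         elif people[mid] < target:
--             i = mid
--             l = mid + 1
--         else:
--             r = mid - 1
--     return i
-- ===== SOURCE B (Python) =====
-- def findPartner(people, target):
--     # Accumulator-free recursive search: the classic loop's predecessor
--     # accumulator always equals l-1, and l = r+1 when the interval empties,
--     # so the base case can simply return the right boundary r.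
--     def go(l, r):
--         if l > r:
--             return r
--         mid = (l + r) // 2
--         x = people[mid]
--         if x == target:
--             return mid
--         return go(mid + 1, r) if x < target else go(l, mid - 1)
--     return go(0, len(people) - 1)
-- ===== Notes on version B (the rewrite author's own statement) =====
-- stated objective: simpler
-- what changed: Drops the predecessor accumulator i entirely: by the loop invariant i = l-1 and l = r+1 at exit, the right boundary r is the answer, so B is a plain accumulator-free recursion whose empty-interval base case returns r.
import Mathlib
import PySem

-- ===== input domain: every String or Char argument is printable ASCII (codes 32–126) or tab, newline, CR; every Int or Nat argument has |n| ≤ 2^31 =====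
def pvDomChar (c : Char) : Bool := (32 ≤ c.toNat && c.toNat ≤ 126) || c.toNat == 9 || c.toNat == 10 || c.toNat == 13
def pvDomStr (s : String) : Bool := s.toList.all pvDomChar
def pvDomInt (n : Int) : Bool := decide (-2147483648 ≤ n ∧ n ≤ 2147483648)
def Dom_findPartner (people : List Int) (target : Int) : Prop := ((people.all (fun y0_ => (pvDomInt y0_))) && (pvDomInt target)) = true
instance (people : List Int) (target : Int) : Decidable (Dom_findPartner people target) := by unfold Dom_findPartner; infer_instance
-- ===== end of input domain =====

-- B removes A's predecessor accumulator: the invariant i = l-1 (and l = r+1 at exit)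
-- lets an accumulator-free recursion return the right boundary r in the base case.

-- ===== PORT A =====
-- the while loop of A as a recursive function over its state (l, r, i);
-- people[mid] is in range whenever 0 ≤ l ≤ mid ≤ r < len, so the IndexError
-- branch of pyGet? is unreachable from findPartner's initial state
def findPartnerLoop (people : List Int) (target l r i : Int) : Int :=
  if h : l ≤ r then
    if (PySem.List.pyGet? people (PySem.Int.floordiv (l + r) 2)).getD 0 = target then
      PySem.Int.floordiv (l + r) 2
    else if (PySem.List.pyGet? people (PySem.Int.floordiv (l + r) 2)).getD 0 < target then
      findPartnerLoop people target (PySem.Int.floordiv (l + r) 2 + 1) r (PySem.Int.floordiv (l + r) 2)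
    else
      findPartnerLoop people target l (PySem.Int.floordiv (l + r) 2 - 1) i
  else i
termination_by (r + 1 - l).toNat
decreasing_by
  · have := PySem.Int.floordiv_two_mid_bounds h; omega
  · have := PySem.Int.floordiv_two_mid_bounds h; omega

def findPartner (people : List Int) (target : Int) : Int :=
  findPartnerLoop people target 0 (people.length - 1) (-1)

-- ===== PORT B =====
def findPartnerGo (people : List Int) (target l r : Int) : Int :=
  if h : l > r then r
  else
    let mid := PySem.Int.floordiv (l + r) 2
    let x := (PySem.List.pyGet? people mid).getD 0
    if x = target then mid
    else if x < target then findPartnerGo people target (mid + 1) r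
    else findPartnerGo people target l (mid - 1)
termination_by (r + 1 - l).toNat
decreasing_by
  all_goals have := PySem.Int.floordiv_two_mid_bounds (by omega : l ≤ r); omega

def findPartner_alt (people : List Int) (target : Int) : Int :=
  findPartnerGo people target 0 (people.length - 1)

-- ===== PRECONDITION & SPEC =====
def Spec_findPartner (people : List Int) (target : Int) (out : Int) : Prop := out = findPartner_alt people target
instance (people : List Int) (target : Int) (out : Int) : Decidable (Spec_findPartner people target out) := by unfold Spec_findPartner; infer_instance

-- ===== CLAIM (what is proved, stated in full; the proofs are below) =====
def Claim_equal_findPartner : Prop := ∀ (people : List Int) (target : Int), Dom_findPartner people target → Spec_findPartner people target (findPartner people target)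

-- ===== LEMMAS AND PROOFS =====

-- invariant bridge: the loop's accumulator always equals l-1, and intervals keep
-- l ≤ r+1, so the loop with accumulator l-1 computes exactly go (which returns r
-- when the interval empties, where l-1 = r)
theorem loop_eq_go (people : List Int) (target l r : Int) (hlr : l ≤ r + 1) :
    findPartnerLoop people target l r (l - 1) = findPartnerGo people target l r := by
  rw [findPartnerLoop, findPartnerGo]
  by_cases h : l ≤ r
  · have hm := PySem.Int.floordiv_two_mid_bounds h
    rw [dif_pos h, dif_neg (by omega : ¬ l > r)]
    simp only []
    split
    · rfl
    · split
      · have := loop_eq_go people target (PySem.Int.floordiv (l + r) 2 + 1) r (by omega)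
        simpa using this
      · exact loop_eq_go people target l (PySem.Int.floordiv (l + r) 2 - 1) (by omega)
  · rw [dif_neg h, dif_pos (by omega : l > r)]
    omega
termination_by (r + 1 - l).toNat
decreasing_by
  all_goals have := PySem.Int.floordiv_two_mid_bounds (by omega : l ≤ r); omega

-- ===== VERDICT (by name: the statement is the Claim_ definition above) =====
theorem findPartner_spec : Claim_equal_findPartner := by
  intro people target _
  unfold Spec_findPartner findPartner findPartner_alt
  have h := loop_eq_go people target 0 (people.length - 1) (by omega)
  simpa using h
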